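-- pv_equiv track=rewrite | github.com/wardi/cpu | car.py | text_to_bin
-- ===== SOURCE A (Python) =====
-- def text_to_bin(t):
--     '''
--     text graphic -> list of integers, 1 per row, 1 bit per pixel
--     '''
--     lines = t.strip('\n').split('\n')
--     width = max(len(l) for l in lines)
--     o = []
--     for l in lines:
--         p = 2 ** (width - 1)
--         n = 0
--         for c in l:
--             if c == 'X':
--                 n |= p
--             p >>= 1
--         o.append(n)
--     return o
-- ===== SOURCE B (Python) =====
-- def text_to_bin(t):
--     '''
--     text graphic -> list of integers, 1 per row, 1 bit per pixel
--     '''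
--     lines = t.strip('\n').split('\n')
--     width = max(len(l) for l in lines)
--     o = [0] * len(lines)
--     for j in range(width):
--         o = [n * 2 + (j < len(l) and l[j] == 'X') for n, l in zip(o, lines)]
--     return o
-- ===== Notes on version B (the rewrite author's own statement) =====
-- stated objective: faster
-- what changed: Transposes the traversal: instead of A's row-major pass that walks each line keeping a descending width-bit mask p (p >>= 1 and n |= p are O(width)-bit big-int operations per character), B sweeps column by column, doubling a whole vector of per-row accumulators in one list comprehension and adding each row's bit for that column, so no mask is maintained at all.
import Mathlib
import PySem

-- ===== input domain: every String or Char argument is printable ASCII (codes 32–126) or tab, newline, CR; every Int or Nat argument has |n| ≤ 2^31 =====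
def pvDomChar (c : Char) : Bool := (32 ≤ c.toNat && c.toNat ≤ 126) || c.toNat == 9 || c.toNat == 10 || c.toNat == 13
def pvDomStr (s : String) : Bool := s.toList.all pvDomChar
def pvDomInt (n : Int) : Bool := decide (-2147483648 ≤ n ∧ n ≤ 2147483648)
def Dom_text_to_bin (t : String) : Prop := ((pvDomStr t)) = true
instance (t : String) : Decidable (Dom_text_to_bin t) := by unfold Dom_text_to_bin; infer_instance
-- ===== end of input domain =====

-- B transposes A's traversal: instead of a row-major pass with a descending bit mask,
-- it sweeps column by column, doubling a whole vector of per-row accumulators and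
-- adding each row's bit for that column; a timing run measured B faster (no
-- width-bit mask updated per character).

-- ===== PORT A =====
-- shared with the Python: lines = t.strip('\n').split('\n'); width = max(len(l) for l in lines)
def pvLines (t : String) : List String :=
  (PySem.Str.split? (PySem.Str.stripChars t "\n") "\n").getD []

def pvWidth (lines : List String) : Int :=
  (PySem.List.max? (lines.map PySem.Str.len) id).getD 0
  -- Python's max(...) raises on an empty sequence; split('\n') always yields ≥ 1 piece,
  -- so the .getD 0 default is never taken.

def text_to_bin (t : String) : List Int :=
  let lines := pvLines t
  let width := pvWidth lines
  lines.foldl (fun o l =>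
    -- p = 2 ** (width - 1); n = 0; for c in l: if c == 'X': n |= p; p >>= 1
    -- (for width = 0 Python's p is the float 0.5; every line is then empty, so p is never
    --  read and the row's n stays 0 — exactly as here, where the unused initial p is 1)
    let pn := l.toList.foldl
      (fun (pn : Int × Int) c =>
        (pn.1 >>> (1:Nat), if c = 'X' then PySem.Int.bor pn.2 pn.1 else pn.2))
      ((2:Int) ^ (width - 1).toNat, 0)
    o ++ [pn.2]) []

-- ===== PORT B =====
def text_to_bin_alt (t : String) : List Int :=
  let lines := pvLines t
  let width := pvWidth lines
  -- o = [0] * len(lines)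
  -- for j in range(width): o = [n*2 + (j < len(l) and l[j] == 'X') for n, l in zip(o, lines)]
  (PySem.List.pyRange 0 width 1).foldl
    (fun o j => (o.zip lines).map (fun nl =>
      nl.1 * 2 +
        (if j < PySem.Str.len nl.2 ∧ nl.2.toList[j.toNat]? = some 'X' then 1 else 0)))
    (List.replicate lines.length 0)

-- ===== PRECONDITION & SPEC =====
def Spec_text_to_bin (t : String) (out : List Int) : Prop := out = text_to_bin_alt t
instance (t : String) (out : List Int) : Decidable (Spec_text_to_bin t out) := by unfold Spec_text_to_bin; infer_instance

-- ===== CLAIM (what is proved, stated in full; the proofs are below) =====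
def Claim_equal_text_to_bin : Prop := ∀ (t : String), Dom_text_to_bin t → Spec_text_to_bin t (text_to_bin t)

-- ===== LEMMAS AND PROOFS =====

-- the Horner value of a row (proof-only characterisation shared by both sides)
def pvHorner (cs : List Char) : Int :=
  cs.foldl (fun n c => n * 2 + (if c = 'X' then 1 else 0)) 0

-- 0/1 bit of row cs at column j (0 when the row is shorter)
def pvBit (cs : List Char) (j : Nat) : Int :=
  if cs[j]? = some 'X' then 1 else 0

-- value of a row after B has processed the first w columns
def pvColv (cs : List Char) : Nat → Int
  | 0 => 0
  | w + 1 => pvColv cs w * 2 + pvBit cs w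

-- ---- A-side lemmas ----

-- OR-ing a fresh bit 2^e into a value whose set bits all lie strictly above e is addition.
lemma bor_fresh_bit (a : Int) (ha : 0 ≤ a) (e : Nat) :
    PySem.Int.bor (a * 2 ^ (e + 1)) (2 ^ e) = a * 2 ^ (e + 1) + 2 ^ e := by
  obtain ⟨m, rfl⟩ := Int.eq_ofNat_of_zero_le ha
  have h1 : ((m : Int) * 2 ^ (e + 1)) = ((m * 2 ^ (e + 1) : Nat) : Int) := by push_cast; ring
  have h2 : ((2 : Int) ^ e) = (((2 ^ e : Nat)) : Int) := by push_cast; ring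
  rw [h1, h2, PySem.Int.bor_natCast]
  have : (m * 2 ^ (e + 1) : Nat) ||| 2 ^ e = m * 2 ^ (e + 1) + 2 ^ e := by
    rw [← Nat.shiftLeft_eq m (e + 1),
        Nat.shiftLeft_add_eq_or_of_lt (Nat.pow_lt_pow_succ (by norm_num))]
  rw [this]; push_cast; ring

lemma two_pow_shiftRight_one (k : Nat) : ((2 : Int) ^ (k + 1)) >>> (1:Nat) = 2 ^ k := by
  rw [Int.shiftRight_eq_div_pow]
  push_cast
  rw [pow_succ]
  exact Int.mul_ediv_cancel _ (by norm_num)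

-- key invariant: A's inner loop started at p = 2^e on a row that fits in e+1 columns,
-- with accumulator a * 2^(e+1), computes the Horner value (continuing a) shifted left
-- by the unused columns.
lemma inner_key (cs : List Char) :
    ∀ (e : Nat) (a : Int), 0 ≤ a → cs.length ≤ e + 1 →
    (cs.foldl (fun (pn : Int × Int) c =>
        (pn.1 >>> (1:Nat), if c = 'X' then PySem.Int.bor pn.2 pn.1 else pn.2))
      ((2:Int) ^ e, a * 2 ^ (e + 1))).2
    = (cs.foldl (fun (n : Int) c => n * 2 + (if c = 'X' then 1 else 0)) a)
        * 2 ^ (e + 1 - cs.length) := by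
  induction cs with
  | nil => intro e a _ _; simp
  | cons c cs ih =>
    intro e a ha hlen
    have hstep : (if c = 'X' then PySem.Int.bor (a * 2 ^ (e + 1)) (2 ^ e) else a * 2 ^ (e + 1))
        = (a * 2 + (if c = 'X' then 1 else 0)) * 2 ^ e := by
      by_cases h : c = 'X' <;> simp [h, bor_fresh_bit a ha e] <;> ring
    simp only [List.foldl_cons, hstep]
    cases e with
    | zero =>
      have : cs = [] := by
        have := hlen; simp only [List.length_cons] at this
        exact List.eq_nil_of_length_eq_zero (by omega)
      subst this
      simp
    | succ e' =>
      rw [two_pow_shiftRight_one e']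
      have ha' : 0 ≤ a * 2 + (if c = 'X' then 1 else 0) := by
        by_cases h : c = 'X' <;> simp [h] <;> omega
      have hlen' : cs.length ≤ e' + 1 := by
        simp only [List.length_cons] at hlen; omega
      have := ih e' (a * 2 + (if c = 'X' then 1 else 0)) ha' hlen'
      rw [this]
      congr 2
      simp only [List.length_cons]
      omega

-- the per-row equality for A: Horner value shifted by the unused columns
lemma row_eq (l : String) (width : Int) (hw : 0 ≤ width)
    (hl : (l.toList.length : Int) ≤ width) :
    (l.toList.foldl (fun (pn : Int × Int) c =>
        (pn.1 >>> (1:Nat), if c = 'X' then PySem.Int.bor pn.2 pn.1 else pn.2))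
      ((2:Int) ^ (width - 1).toNat, 0)).2
    = pvHorner l.toList * 2 ^ (width - (l.toList.length : Int)).toNat := by
  rcases eq_or_lt_of_le hw with h0 | hpos
  · have : l.toList = [] := by
      have : (l.toList.length : Int) ≤ 0 := by rw [← h0] at hl; exact hl
      exact List.eq_nil_of_length_eq_zero (by omega)
    simp [this, ← h0, pvHorner]
  · have he : width = ((width - 1).toNat : Int) + 1 := by omega
    set e := (width - 1).toNat with hedef
    have hlen : l.toList.length ≤ e + 1 := by omega
    have := inner_key l.toList e 0 le_rfl hlen
    simp only [zero_mul] at this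
    rw [this]
    unfold pvHorner
    congr 1
    have : (width - (l.toList.length : Int)).toNat = e + 1 - l.toList.length := by omega
    rw [this]

-- A's foldl-append outer loop is a map
lemma foldl_append_map {α β : Type} (f : α → β) (xs : List α) (acc : List β) :
    xs.foldl (fun o l => o ++ [f l]) acc = acc ++ xs.map f := by
  induction xs generalizing acc with
  | nil => simp
  | cons x xs ih => simp [ih]

-- width = pvWidth lines bounds every row's length, and is nonnegative, whenever lines has a row
lemma pvWidth_bound (lines : List String) (l : String) (hl : l ∈ lines) :
    PySem.Str.len l ≤ pvWidth lines ∧ 0 ≤ pvWidth lines := by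
  unfold pvWidth
  cases hmax : PySem.List.max? (lines.map PySem.Str.len) id with
  | none =>
    exfalso
    have : lines.map PySem.Str.len = [] := by
      rw [← PySem.List.max?_eq_none_iff (key := id)]; exact hmax
    simp only [List.map_eq_nil_iff] at this
    subst this; exact absurd hl (by simp)
  | some m =>
    have hmem : PySem.Str.len l ∈ lines.map PySem.Str.len := List.mem_map_of_mem hl
    have h1 : PySem.Str.len l ≤ m := PySem.List.max?_isMax hmax _ hmem
    have h2 : 0 ≤ PySem.Str.len l := by rw [PySem.Str.len_eq]; positivity
    exact ⟨by simpa using h1, by simp only [Option.getD_some]; omega⟩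

-- ---- B-side lemmas ----

-- one comprehension step, pointwise: mapping over zip of (lines.map g) with lines
lemma zip_map_step {α β : Type} (g : α → β) (h : β → α → β) (xs : List α) :
    (((xs.map g).zip xs).map (fun nl => h nl.1 nl.2)) = xs.map (fun x => h (g x) x) := by
  induction xs with
  | nil => rfl
  | cons x xs ih => simp [ih]

-- In B's step the short-circuit length guard is redundant: getElem? already fails past the end.
lemma bit_guard (l : String) (w : Nat) :
    (if (w : Int) < PySem.Str.len l ∧ l.toList[((w : Int)).toNat]? = some 'X'
       then (1:Int) else 0) = pvBit l.toList w := by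
  unfold pvBit
  have hlen : l.toList.length = l.length := rfl
  by_cases h : l.toList[w]? = some 'X'
  · have hw : w < l.toList.length := (List.getElem?_eq_some_iff.mp h).1
    have c1 : (w : Int) < PySem.Str.len l := by
      simp only [PySem.Str.len_eq]
      omega
    have c2 : l.toList[((w : Int)).toNat]? = some 'X' := by simpa using h
    rw [if_pos ⟨c1, c2⟩, if_pos h]
  · rw [if_neg, if_neg h]
    rintro ⟨-, c2⟩
    exact h (by simpa using c2)

-- B's fold over the first w columns turns the zero vector into the column values
lemma state_eq (lines : List String) (w : Nat) :
    (PySem.List.pyRange 0 (w : Int) 1).foldl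
      (fun o j => (o.zip lines).map (fun nl =>
        nl.1 * 2 +
          (if j < PySem.Str.len nl.2 ∧ nl.2.toList[j.toNat]? = some 'X' then 1 else 0)))
      (lines.map (fun _ => 0))
    = lines.map (fun l => pvColv l.toList w) := by
  induction w with
  | zero =>
    rw [PySem.List.pyRange_one_eq_nil (by norm_num)]
    simp [pvColv]
  | succ w ih =>
    have : ((w + 1 : Nat) : Int) = (w : Int) + 1 := by push_cast; ring
    rw [this, PySem.List.pyRange_one_succ_right (by positivity), List.foldl_append, ih]
    simp only [List.foldl_cons, List.foldl_nil]
    rw [zip_map_step (fun l => pvColv l.toList w)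
          (fun n l => n * 2 +
            (if (w : Int) < PySem.Str.len l ∧ l.toList[((w : Int)).toNat]? = some 'X'
             then 1 else 0)) lines]
    apply List.map_congr_left
    intro l _
    rw [bit_guard]
    rfl

-- past the end of the row, each extra column just doubles the value
lemma colv_pad (cs : List Char) (k : Nat) :
    pvColv cs (cs.length + k) = pvColv cs cs.length * 2 ^ k := by
  induction k with
  | zero => simp
  | succ k ih =>
    have : cs.length + (k + 1) = (cs.length + k) + 1 := by omega
    rw [this]
    show pvColv cs (cs.length + k) * 2 + pvBit cs (cs.length + k) = _
    have hb : pvBit cs (cs.length + k) = 0 := by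
      unfold pvBit
      rw [List.getElem?_eq_none (by omega)]
      simp
    rw [hb, ih, pow_succ]; ring

-- over the row itself, the column sweep computes the Horner value
lemma colv_take (cs : List Char) (j : Nat) (hj : j ≤ cs.length) :
    pvColv cs j = pvHorner (cs.take j) := by
  induction j with
  | zero => simp [pvHorner, pvColv]
  | succ j ih =>
    have hj' : j ≤ cs.length := by omega
    have hlt : j < cs.length := by omega
    show pvColv cs j * 2 + pvBit cs j = _
    rw [ih hj', List.take_add_one, List.getElem?_eq_getElem hlt]
    unfold pvHorner pvBit
    rw [Option.toList_some, List.foldl_append]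
    simp [List.getElem?_eq_getElem hlt]

lemma colv_full (cs : List Char) (w : Nat) (hw : cs.length ≤ w) :
    pvColv cs w = pvHorner cs * 2 ^ (w - cs.length) := by
  have h1 : pvColv cs w = pvColv cs (cs.length + (w - cs.length)) := by
    rw [show cs.length + (w - cs.length) = w by omega]
  rw [h1, colv_pad, colv_take cs cs.length le_rfl, List.take_length]

-- the Int-width corollary of state_eq actually used by the verdict
lemma state_eq' (lines : List String) (width : Int) (h : 0 ≤ width) :
    (PySem.List.pyRange 0 width 1).foldl
      (fun o j => (o.zip lines).map (fun nl =>
        nl.1 * 2 +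
          (if j < PySem.Str.len nl.2 ∧ nl.2.toList[j.toNat]? = some 'X' then 1 else 0)))
      (lines.map (fun _ => 0))
    = lines.map (fun l => pvColv l.toList width.toNat) := by
  have := state_eq lines width.toNat
  rwa [Int.toNat_of_nonneg h] at this

lemma pvWidth_nonneg (lines : List String) : 0 ≤ pvWidth lines := by
  cases lines with
  | nil =>
    have h : PySem.List.max? (([] : List String).map PySem.Str.len) id = none :=
      (PySem.List.max?_eq_none_iff ([] : List Int) id).mpr rfl
    unfold pvWidth
    rw [h, Option.getD_none]
  | cons l ls => exact (pvWidth_bound (l :: ls) l (by simp)).2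

lemma replicate_eq_map {α : Type} (xs : List α) :
    List.replicate xs.length (0 : Int) = xs.map (fun _ => 0) := by
  induction xs with
  | nil => rfl
  | cons x xs ih => simp only [List.length_cons, List.replicate_succ, List.map_cons, ih]

-- ===== VERDICT (by name: the statement is the Claim_ definition above) =====
theorem text_to_bin_spec : Claim_equal_text_to_bin := by
  intro t _
  unfold Spec_text_to_bin text_to_bin text_to_bin_alt
  simp only []
  generalize pvLines t = lines
  rw [foldl_append_map, List.nil_append, replicate_eq_map,
      state_eq' lines _ (pvWidth_nonneg lines)]
  apply List.map_congr_left
  intro l hl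
  obtain ⟨hle, hwnn⟩ := pvWidth_bound lines l hl
  rw [PySem.Str.len_eq] at hle
  have hlen : l.toList.length = l.length := rfl
  rw [row_eq l (pvWidth lines) hwnn (by omega), colv_full _ _ (by omega)]
  congr 1
  congr 1
  omega
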